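-- pv_equiv track=rewrite | github.com/Sreeraj-004/AssessAI | app/services/evaluation.py | check_sentence_validity
-- ===== SOURCE A (Python) =====
-- def check_sentence_validity(sentence: str) -> bool:
--     """Check if a sentence has too many repeated words"""
--     words = sentence.lower().split()
--     word_count = {}
--     for word in words:
--         word_count[word] = word_count.get(word, 0) + 1
--         if word_count[word] >= 5:  # If any word appears 5 or more times
--             return False
--     return True
-- ===== SOURCE B (Python) =====
-- def check_sentence_validity(sentence: str) -> bool:
--     """Check if a sentence has too many repeated words"""
--     words = sorted(sentence.lower().split())
--     prev = None
--     run = 0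
--     for w in words:
--         run = run + 1 if w == prev else 1
--         prev = w
--         if run >= 5:
--             return False
--     return True
-- ===== Notes on version B (the rewrite author's own statement) =====
-- stated objective: alternative
-- what changed: Replaces A's hash-map frequency counting (dict with get and early exit) by sort-then-scan: the word list is sorted and a single run-length scan over adjacent equal words detects a word occurring 5 or more times.
import Mathlib
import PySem

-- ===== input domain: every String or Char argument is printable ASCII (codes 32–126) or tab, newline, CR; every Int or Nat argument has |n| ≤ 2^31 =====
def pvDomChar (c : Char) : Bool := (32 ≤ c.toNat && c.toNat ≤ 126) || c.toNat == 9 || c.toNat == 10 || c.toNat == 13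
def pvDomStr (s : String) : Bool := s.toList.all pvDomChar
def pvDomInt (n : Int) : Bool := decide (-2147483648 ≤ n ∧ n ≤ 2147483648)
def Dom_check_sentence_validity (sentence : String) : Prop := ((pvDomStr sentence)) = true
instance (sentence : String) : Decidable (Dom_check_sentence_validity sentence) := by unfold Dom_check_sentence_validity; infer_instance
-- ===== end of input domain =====

-- B replaces A's dict frequency counting by sort + run-length scan (alternative decomposition, same result).

-- ===== PORT A =====
-- the for-loop over words with the counting dict and early 'return False'
def csvLoopA : List String → PySem.Dict String Int → Bool
  | [], _ => true
  | w :: rest, d =>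
    let c := d.getD w 0 + 1
    let d' := d.insert w c
    if 5 ≤ c then false else csvLoopA rest d'

def check_sentence_validity (sentence : String) : Bool :=
  let words := PySem.Str.split₀ (PySem.Str.lower sentence)
  csvLoopA words PySem.Dict.empty

-- ===== PORT B =====
-- the for-loop over the sorted words with prev/run state and early 'return False'
def csvLoopB : List String → Option String → Nat → Bool
  | [], _, _ => true
  | w :: rest, prev, run =>
    let run' := if prev = some w then run + 1 else 1
    if 5 ≤ run' then false else csvLoopB rest (some w) run'

def check_sentence_validity_alt (sentence : String) : Bool :=
  let words := PySem.List.sorted (PySem.Str.split₀ (PySem.Str.lower sentence)) (fun x => x) false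
  csvLoopB words none 0

-- ===== PRECONDITION & SPEC =====
def Spec_check_sentence_validity (sentence : String) (out : Bool) : Prop := out = check_sentence_validity_alt sentence
instance (sentence : String) (out : Bool) : Decidable (Spec_check_sentence_validity sentence out) := by unfold Spec_check_sentence_validity; infer_instance

-- ===== CLAIM (what is proved, stated in full; the proofs are below) =====
def Claim_equal_check_sentence_validity : Prop := ∀ (sentence : String), Dom_check_sentence_validity sentence → Spec_check_sentence_validity sentence (check_sentence_validity sentence)

-- ===== LEMMAS AND PROOFS =====

-- A's loop returns true iff every word's accumulated total stays below 5
theorem csvLoopA_eq_true_iff (ws : List String) (d : PySem.Dict String Int) :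
    csvLoopA ws d = true ↔ ∀ v ∈ ws, d.getD v 0 + (ws.count v : Int) < 5 := by
  induction ws generalizing d with
  | nil => simp [csvLoopA]
  | cons w rest ih =>
    simp only [csvLoopA]
    split_ifs with h5
    · constructor
      · intro h; cases h
      · intro h
        have hw := h w (by simp)
        have hc : (0:Int) < ((w :: rest).count w : Int) := by
          exact_mod_cast List.count_pos_iff.mpr (by simp)
        have hc1 : (1:Int) ≤ ((w :: rest).count w : Int) := hc
        omega
    · rw [ih]
      constructor
      · intro h v hv
        by_cases hvw : v = w
        · subst hvw
          by_cases hm : v ∈ rest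
          · have := h v hm
            rw [PySem.Dict.getD_insert, if_pos rfl] at this
            rw [List.count_cons_self]
            push_cast at this ⊢; omega
          · rw [List.count_cons_self, List.count_eq_zero.mpr hm]
            push_cast; omega
        · have := h v (List.mem_of_ne_of_mem hvw hv)
          rw [PySem.Dict.getD_insert, if_neg hvw] at this
          rw [List.count_cons_of_ne (Ne.symm hvw)]
          exact this
      · intro h v hv
        rw [PySem.Dict.getD_insert]
        by_cases hvw : v = w
        · subst hvw
          rw [if_pos rfl]
          have := h v (by simp)
          rw [List.count_cons_self] at this
          push_cast at this ⊢; omega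
        · rw [if_neg hvw]
          have := h v (List.mem_cons_of_mem _ hv)
          rw [List.count_cons_of_ne (Ne.symm hvw)] at this
          exact this

-- B's loop on a sorted tail, carrying run r for the previous word p
theorem csvLoopB_eq_true_iff (ws : List String) (p : String) (r : Nat)
    (hsort : ws.Pairwise (· ≤ ·)) (hle : ∀ v ∈ ws, p ≤ v) (hr : r < 5) :
    csvLoopB ws (some p) r = true ↔
      (r + ws.count p < 5 ∧ ∀ v ∈ ws, ws.count v < 5) := by
  induction ws generalizing p r with
  | nil => simpa [csvLoopB] using hr
  | cons w rest ih =>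
    have hrest : rest.Pairwise (· ≤ ·) := (List.pairwise_cons.mp hsort).2
    have hwle : ∀ v ∈ rest, w ≤ v := (List.pairwise_cons.mp hsort).1
    simp only [csvLoopB]
    by_cases hwp : w = p
    · subst hwp
      rw [if_pos rfl]
      split_ifs with h5
      · constructor
        · intro h; cases h
        · intro h
          have := h.1
          rw [List.count_cons_self] at this
          omega
      · rw [ih w (r + 1) hrest hwle (by omega)]
        rw [List.count_cons_self]
        constructor
        · intro ⟨h1, h2⟩
          refine ⟨by omega, ?_⟩
          intro v hv
          by_cases hvw : v = w
          · subst hvw; rw [List.count_cons_self]; omega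
          · have hv' : v ∈ rest := List.mem_of_ne_of_mem hvw hv
            rw [List.count_cons_of_ne (Ne.symm hvw)]
            exact h2 v hv'
        · intro ⟨h1, h2⟩
          refine ⟨by omega, ?_⟩
          intro v hv
          by_cases hvw : v = w
          · subst hvw; omega
          · rw [← List.count_cons_of_ne (Ne.symm hvw)]
            exact h2 v (List.mem_cons_of_mem _ hv)
    · have hne : ¬ (some p = some w) := fun h => hwp (Option.some.inj h).symm
      rw [if_neg hne, if_neg (by omega : ¬ 5 ≤ 1)]
      have hpw : p < w := lt_of_le_of_ne (hle w (by simp)) (fun h => hwp h.symm)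
      have hpnot : p ∉ w :: rest := by
        intro hmem
        rcases List.mem_cons.mp hmem with rfl | hmem'
        · exact absurd rfl hwp
        · exact absurd (hwle p hmem') (not_le.mpr hpw)
      rw [List.count_eq_zero.mpr hpnot]
      rw [ih w 1 hrest hwle (by omega)]
      constructor
      · intro ⟨h1, h2⟩
        refine ⟨by omega, ?_⟩
        intro v hv
        by_cases hvw : v = w
        · subst hvw; rw [List.count_cons_self]; omega
        · rw [List.count_cons_of_ne (Ne.symm hvw)]
          exact h2 v (List.mem_of_ne_of_mem hvw hv)
      · intro ⟨_, h2⟩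
        constructor
        · have := h2 w (by simp)
          rw [List.count_cons_self] at this
          omega
        · intro v hv
          by_cases hvw : v = w
          · subst hvw
            have := h2 v (by simp)
            rw [List.count_cons_self] at this
            omega
          · rw [← List.count_cons_of_ne (Ne.symm hvw)]
            exact h2 v (List.mem_cons_of_mem _ hv)

-- B's full scan on a sorted list: true iff no word occurs 5 or more times
theorem csvLoopB_start_iff (ws : List String) (hsort : ws.Pairwise (· ≤ ·)) :
    csvLoopB ws none 0 = true ↔ ∀ v ∈ ws, ws.count v < 5 := by
  cases ws with
  | nil => simp [csvLoopB]
  | cons w rest =>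
    have hrest : rest.Pairwise (· ≤ ·) := (List.pairwise_cons.mp hsort).2
    have hwle : ∀ v ∈ rest, w ≤ v := (List.pairwise_cons.mp hsort).1
    simp only [csvLoopB]
    rw [if_neg (by simp : ¬ ((none : Option String) = some w)),
        if_neg (by omega : ¬ 5 ≤ 1)]
    rw [csvLoopB_eq_true_iff rest w 1 hrest hwle (by omega)]
    constructor
    · intro ⟨h1, h2⟩ v hv
      by_cases hvw : v = w
      · subst hvw; rw [List.count_cons_self]; omega
      · rw [List.count_cons_of_ne (Ne.symm hvw)]
        exact h2 v (List.mem_of_ne_of_mem hvw hv)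
    · intro h
      constructor
      · have := h w (by simp)
        rw [List.count_cons_self] at this
        omega
      · intro v hv
        by_cases hvw : v = w
        · subst hvw
          have := h v (by simp)
          rw [List.count_cons_self] at this
          omega
        · rw [← List.count_cons_of_ne (Ne.symm hvw)]
          exact h v (List.mem_cons_of_mem _ hv)

-- ===== VERDICT (by name: the statement is the Claim_ definition above) =====
theorem check_sentence_validity_spec : Claim_equal_check_sentence_validity := by
  intro sentence _
  unfold Spec_check_sentence_validity check_sentence_validity check_sentence_validity_alt
  simp only []
  set ws := PySem.Str.split₀ (PySem.Str.lower sentence) with hws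
  set sws := PySem.List.sorted ws (fun x => x) false with hsws
  have hperm : sws.Perm ws := PySem.List.sorted_perm ws (fun x => x) false
  have hsort : sws.Pairwise (· ≤ ·) := PySem.List.sorted_pairwise ws (fun x => x)
  have hA : csvLoopA ws PySem.Dict.empty = true ↔ ∀ v ∈ ws, ws.count v < 5 := by
    rw [csvLoopA_eq_true_iff]
    constructor
    · intro h v hv
      have := h v hv
      rw [PySem.Dict.getD_empty] at this
      exact_mod_cast (by omega : ((ws.count v : Int)) < 5)
    · intro h v hv
      rw [PySem.Dict.getD_empty]
      have := h v hv
      omega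
  have hB : csvLoopB sws none 0 = true ↔ ∀ v ∈ ws, ws.count v < 5 := by
    rw [csvLoopB_start_iff sws hsort]
    constructor
    · intro h v hv
      rw [← hperm.count_eq v]
      exact h v (hperm.mem_iff.mpr hv)
    · intro h v hv
      rw [hperm.count_eq v]
      exact h v (hperm.mem_iff.mp hv)
  exact Bool.eq_iff_iff.mpr (hA.trans hB.symm)
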